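-- pv_equiv track=rewrite | github.com/adas2125/vegeta | scripts_eval/xlg_eval_common.py | mode_label
-- ===== SOURCE A (Python) =====
-- from collections import Counter
-- from typing import Any, Iterable
--
-- LABEL_ORDER = [
--     "FEW_CONNECTIONS",
--     "FEW_WORKERS",
--     "CPU_CONTENTION",
--     "SUT_DEGRADED",
--     "SUT_FASTER",
--     "NORMAL",
-- ]
--
-- def mode_label(labels: Iterable[str]) -> str:
--     """Return the modal label with stable label-order tie breaking."""
--     labels = list(labels)
--     if not labels:
--         return "UNKNOWN"
--     counts = Counter(labels)
--     best_count = max(counts.values())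
--     for label in LABEL_ORDER:
--         if counts.get(label, 0) == best_count:
--             return label
--     return counts.most_common(1)[0][0]
-- ===== SOURCE B (Python) =====
-- LABEL_ORDER = [
--     "FEW_CONNECTIONS",
--     "FEW_WORKERS",
--     "CPU_CONTENTION",
--     "SUT_DEGRADED",
--     "SUT_FASTER",
--     "NORMAL",
-- ]
--
-- def mode_label(labels):
--     """Modal label, selected in one keyed argmax: key = (count, known-rank),
--     where known-rank prefers earlier LABEL_ORDER entries and max() keeps the
--     first-inserted item on full ties."""
--     labels = list(labels)
--     if not labels:
--         return "UNKNOWN"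
--     rank = {lab: len(LABEL_ORDER) - i for i, lab in enumerate(LABEL_ORDER)}
--     counts = {}
--     for lab in labels:
--         counts[lab] = counts.get(lab, 0) + 1
--     return max(counts.items(), key=lambda kv: (kv[1], rank.get(kv[0], 0)))[0]
-- ===== Notes on version B (the rewrite author's own statement) =====
-- stated objective: simpler
-- what changed: A's three-stage selection (global max of counts, scan of LABEL_ORDER for a label attaining it, Counter.most_common fallback) is replaced by one keyed argmax over the count dict's items with key (count, known-label rank), relying on max() keeping the first item on full ties.
import Mathlib
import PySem

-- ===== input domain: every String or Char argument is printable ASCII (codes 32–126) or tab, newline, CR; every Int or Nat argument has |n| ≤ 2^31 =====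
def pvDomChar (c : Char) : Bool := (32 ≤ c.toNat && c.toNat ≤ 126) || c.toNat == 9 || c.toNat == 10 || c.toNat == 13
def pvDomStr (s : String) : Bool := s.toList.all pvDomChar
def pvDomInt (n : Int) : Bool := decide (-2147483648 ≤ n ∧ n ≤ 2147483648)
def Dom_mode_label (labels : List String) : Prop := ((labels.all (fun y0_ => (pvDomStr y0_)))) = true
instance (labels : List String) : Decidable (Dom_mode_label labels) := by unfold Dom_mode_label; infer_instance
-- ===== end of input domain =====

-- B replaces A's three-stage selection (global max count, scan of LABEL_ORDER, Counter.most_common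
-- fallback) by a single keyed argmax over the count dict with key (count, known-label rank); same
-- return value everywhere, no speed claim.

-- module constant shared by both implementations
def LABEL_ORDER : List String :=
  ["FEW_CONNECTIONS", "FEW_WORKERS", "CPU_CONTENTION", "SUT_DEGRADED", "SUT_FASTER", "NORMAL"]

-- ===== PORT A =====
def mode_label (labels : List String) : String :=
  if labels = [] then "UNKNOWN"
  else
    let counts := PySem.Dict.counter labels            -- counts = Counter(labels)
    let best := (PySem.List.max? counts.values (fun v => v)).getD 0   -- max(counts.values()); nonempty here
    match LABEL_ORDER.find? (fun l => counts.getD l 0 == best) with   -- the for-loop with early return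
    | some l => l
    | none =>
      -- counts.most_common(1)[0][0]: the first-inserted item with maximal count
      match PySem.List.max? counts.items (fun p => p.2) with
      | some p => p.1
      | none => ""                                      -- unreachable: counts is nonempty

-- ===== PORT B =====
def pvRankDict : PySem.Dict String Int :=
  (PySem.List.enumerate LABEL_ORDER).foldl
    (fun d p => d.insert p.2 ((LABEL_ORDER.length : Int) - p.1)) PySem.Dict.empty

def mode_label_alt (labels : List String) : String :=
  if labels = [] then "UNKNOWN"
  else
    let counts : PySem.Dict String Int := labels.foldl (fun d x => d.insert x (d.getD x 0 + 1)) PySem.Dict.empty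
    match PySem.List.max2? counts.items (fun kv => kv.2) (fun kv => pvRankDict.getD kv.1 0) with
    | some kv => kv.1
    | none => "UNKNOWN"                                 -- unreachable: counts is nonempty

-- ===== PRECONDITION & SPEC =====
def Spec_mode_label (labels : List String) (out : String) : Prop := out = mode_label_alt labels
instance (labels : List String) (out : String) : Decidable (Spec_mode_label labels out) := by unfold Spec_mode_label; infer_instance

-- ===== CLAIM (what is proved, stated in full; the proofs are below) =====
def Claim_equal_mode_label : Prop := ∀ (labels : List String), Dom_mode_label labels → Spec_mode_label labels (mode_label labels)

-- ===== LEMMAS AND PROOFS =====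

-- the rank B's dict assigns: 6 … 1 on LABEL_ORDER in order, 0 on unknown labels
def pvRankF (s : String) : Int :=
  if s = "FEW_CONNECTIONS" then 6
  else if s = "FEW_WORKERS" then 5
  else if s = "CPU_CONTENTION" then 4
  else if s = "SUT_DEGRADED" then 3
  else if s = "SUT_FASTER" then 2
  else if s = "NORMAL" then 1
  else 0

lemma pvRankDict_eq : pvRankDict = PySem.Dict.mk
    [("FEW_CONNECTIONS", 6), ("FEW_WORKERS", 5), ("CPU_CONTENTION", 4),
     ("SUT_DEGRADED", 3), ("SUT_FASTER", 2), ("NORMAL", 1)] := by decide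

lemma pvRankDict_getD (s : String) : pvRankDict.getD s 0 = pvRankF s := by
  rw [pvRankDict_eq]
  simp only [PySem.Dict.getD_eq_get?_getD, PySem.Dict.get?_mk_cons, pvRankF]
  by_cases h1 : s = "FEW_CONNECTIONS" <;> by_cases h2 : s = "FEW_WORKERS" <;>
  by_cases h3 : s = "CPU_CONTENTION" <;> by_cases h4 : s = "SUT_DEGRADED" <;>
  by_cases h5 : s = "SUT_FASTER" <;> by_cases h6 : s = "NORMAL" <;>
    simp_all [PySem.Dict.get?]
  simp [Ne.symm h1, Ne.symm h2, Ne.symm h3, Ne.symm h4, Ne.symm h5, Ne.symm h6]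

-- lexicographic strict order used by max2?'s key
def pvLexLt {α : Type} (k1 k2 : α → Int) (a b : α) : Prop :=
  k1 a < k1 b ∨ (k1 a = k1 b ∧ k2 a < k2 b)

-- max2? fold step, named for the lemmas below
def pvStep {α : Type} (k1 k2 : α → Int) (acc : Option α) (x : α) : Option α :=
  match acc with
  | none => some x
  | some m => if (decide (k1 m < k1 x) || !decide (k1 x < k1 m) && decide (k2 m < k2 x)) = true then some x else some m

lemma max2?_eq_foldl_pvStep {α : Type} (k1 k2 : α → Int) (xs : List α) :
    PySem.List.max2? xs k1 k2 = xs.foldl (pvStep k1 k2) none := rfl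

lemma pvStep_lt {α : Type} {k1 k2 : α → Int} {m x : α} (h : pvLexLt k1 k2 m x) :
    pvStep k1 k2 (some m) x = some x := by
  simp only [pvLexLt] at h
  simp only [pvStep]
  by_cases h1 : k1 m < k1 x <;> by_cases h2 : k1 x < k1 m <;> by_cases h3 : k2 m < k2 x <;>
    simp [h1, h2, h3] <;> omega

lemma pvStep_not {α : Type} {k1 k2 : α → Int} {m x : α} (h : ¬ pvLexLt k1 k2 m x) :
    pvStep k1 k2 (some m) x = some m := by
  simp only [pvLexLt, not_or, not_and] at h
  simp only [pvStep]
  by_cases h1 : k1 m < k1 x <;> by_cases h2 : k1 x < k1 m <;> by_cases h3 : k2 m < k2 x <;>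
    simp [h1, h2, h3] <;> omega

lemma pv_foldl_keep {α : Type} (k1 k2 : α → Int) (p0 : α) :
    ∀ (xs : List α), (∀ z ∈ xs, z ≠ p0 → pvLexLt k1 k2 z p0) →
      xs.foldl (pvStep k1 k2) (some p0) = some p0 := by
  intro xs
  induction xs with
  | nil => intro _; rfl
  | cons z t ih =>
    intro h
    have hz : pvStep k1 k2 (some p0) z = some p0 := by
      apply pvStep_not
      by_cases hzp : z = p0
      · subst hzp; simp only [pvLexLt]; omega
      · have := h z (by simp) hzp
        simp only [pvLexLt] at this ⊢
        omega
    rw [List.foldl_cons, hz]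
    exact ih (fun w hw => h w (by simp [hw]))

lemma pv_foldl_reach {α : Type} (k1 k2 : α → Int) (p0 : α) :
    ∀ (xs : List α) (m : α), pvLexLt k1 k2 m p0 → p0 ∈ xs →
      (∀ z ∈ xs, z ≠ p0 → pvLexLt k1 k2 z p0) →
      xs.foldl (pvStep k1 k2) (some m) = some p0 := by
  intro xs
  induction xs with
  | nil => intro m _ hmem; simp at hmem
  | cons z t ih =>
    intro m hm hmem h
    by_cases hzp : z = p0
    · subst hzp
      rw [List.foldl_cons, pvStep_lt hm]
      exact pv_foldl_keep k1 k2 z t (fun w hw => h w (by simp [hw]))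
    · have hmem' : p0 ∈ t := by
        rcases List.mem_cons.mp hmem with h1 | h1
        · exact absurd h1.symm hzp
        · exact h1
      have hz : pvLexLt k1 k2 z p0 := h z (by simp) hzp
      rw [List.foldl_cons]
      by_cases hmz : pvLexLt k1 k2 m z
      · rw [pvStep_lt hmz]
        exact ih z hz hmem' (fun w hw => h w (by simp [hw]))
      · rw [pvStep_not hmz]
        exact ih m hm hmem' (fun w hw => h w (by simp [hw]))

-- max2? returns a strict lexicographic maximum wherever it sits
lemma pv_max2?_of_strict {α : Type} (k1 k2 : α → Int) (xs : List α) (p0 : α)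
    (hmem : p0 ∈ xs) (h : ∀ y ∈ xs, y ≠ p0 → pvLexLt k1 k2 y p0) :
    PySem.List.max2? xs k1 k2 = some p0 := by
  rw [max2?_eq_foldl_pvStep]
  cases xs with
  | nil => simp at hmem
  | cons z t =>
    rw [List.foldl_cons]
    show t.foldl (pvStep k1 k2) (some z) = some p0
    by_cases hzp : z = p0
    · subst hzp
      exact pv_foldl_keep k1 k2 z t (fun w hw => h w (by simp [hw]))
    · have hmem' : p0 ∈ t := by
        rcases List.mem_cons.mp hmem with h1 | h1
        · exact absurd h1.symm hzp
        · exact h1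
      exact pv_foldl_reach k1 k2 p0 t z (h z (by simp) hzp) hmem' (fun w hw => h w (by simp [hw]))

-- with count M attained only at rank-constant elements, max2? is the first attainer
lemma pv_foldl_stay {α : Type} (k1 k2 : α → Int) (M c : Int) :
    ∀ (xs : List α) (m : α), k1 m = M → k2 m = c →
      (∀ y ∈ xs, k1 y ≤ M) → (∀ y ∈ xs, k1 y = M → k2 y = c) →
      xs.foldl (pvStep k1 k2) (some m) = some m := by
  intro xs
  induction xs with
  | nil => intro m _ _ _ _; rfl
  | cons z t ih =>
    intro m hm1 hm2 hle hc
    have hz : pvStep k1 k2 (some m) z = some m := by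
      apply pvStep_not
      have h1 := hle z (by simp)
      by_cases he : k1 z = M
      · have := hc z (by simp) he
        simp only [pvLexLt]; omega
      · simp only [pvLexLt]; omega
    rw [List.foldl_cons, hz]
    exact ih m hm1 hm2 (fun y hy => hle y (by simp [hy])) (fun y hy => hc y (by simp [hy]))

lemma pv_foldl_find {α : Type} (k1 k2 : α → Int) (M c : Int) :
    ∀ (xs : List α) (m x0 : α), k1 m < M →
      (∀ y ∈ xs, k1 y ≤ M) → (∀ y ∈ xs, k1 y = M → k2 y = c) →
      xs.find? (fun x => k1 x == M) = some x0 →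
      xs.foldl (pvStep k1 k2) (some m) = some x0 := by
  intro xs
  induction xs with
  | nil => intro m x0 _ _ _ hf; simp at hf
  | cons z t ih =>
    intro m x0 hm hle hc hf
    by_cases hz : k1 z = M
    · have hx0 : z = x0 := by
        rw [List.find?_cons_of_pos (by simp [hz])] at hf; exact Option.some.inj hf
      subst hx0
      have hstep : pvStep k1 k2 (some m) z = some z := by
        apply pvStep_lt; simp only [pvLexLt]; omega
      rw [List.foldl_cons, hstep]
      exact pv_foldl_stay k1 k2 M c t z hz (hc z (by simp) hz)
        (fun y hy => hle y (by simp [hy])) (fun y hy => hc y (by simp [hy]))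
    · rw [List.find?_cons_of_neg (by simp [hz])] at hf
      have hzlt : k1 z < M := lt_of_le_of_ne (hle z (by simp)) hz
      rw [List.foldl_cons]
      by_cases hmz : pvLexLt k1 k2 m z
      · rw [pvStep_lt hmz]
        exact ih z x0 hzlt (fun y hy => hle y (by simp [hy])) (fun y hy => hc y (by simp [hy])) hf
      · rw [pvStep_not hmz]
        exact ih m x0 hm (fun y hy => hle y (by simp [hy])) (fun y hy => hc y (by simp [hy])) hf

lemma pv_max2?_eq_find {α : Type} (k1 k2 : α → Int) (M c : Int) (xs : List α) (x0 : α)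
    (hle : ∀ y ∈ xs, k1 y ≤ M) (hc : ∀ y ∈ xs, k1 y = M → k2 y = c)
    (hf : xs.find? (fun x => k1 x == M) = some x0) :
    PySem.List.max2? xs k1 k2 = some x0 := by
  rw [max2?_eq_foldl_pvStep]
  cases xs with
  | nil => simp at hf
  | cons z t =>
    rw [List.foldl_cons]
    show t.foldl (pvStep k1 k2) (some z) = some x0
    by_cases hz : k1 z = M
    · have hx0 : z = x0 := by
        rw [List.find?_cons_of_pos (by simp [hz])] at hf; exact Option.some.inj hf
      subst hx0
      exact pv_foldl_stay k1 k2 M c t z hz (hc z (by simp) hz)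
        (fun y hy => hle y (by simp [hy])) (fun y hy => hc y (by simp [hy]))
    · rw [List.find?_cons_of_neg (by simp [hz])] at hf
      have hzlt : k1 z < M := lt_of_le_of_ne (hle z (by simp)) hz
      exact pv_foldl_find k1 k2 M c t z x0 hzlt
        (fun y hy => hle y (by simp [hy])) (fun y hy => hc y (by simp [hy])) hf

-- max? (one key) is max2? with constant second key
lemma pv_max?_eq_max2? {α : Type} (k : α → Int) (xs : List α) :
    PySem.List.max? xs k = PySem.List.max2? xs k (fun _ => (0:Int)) := by
  show xs.foldl _ none = xs.foldl _ none
  apply PySem.List.foldl_congr_mem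
  intro acc x _
  cases acc with
  | none => rfl
  | some m => by_cases h : k m < k x <;> simp [h]

-- A's LABEL_ORDER scan: any other label satisfying the predicate ranks strictly below the hit
lemma pv_find_rank_lt (p : String → Bool) (l0 : String)
    (hf : LABEL_ORDER.find? p = some l0) :
    ∀ k, p k = true → k ≠ l0 → pvRankF k < pvRankF l0 := by
  intro k hk hkl
  simp only [LABEL_ORDER] at hf
  by_cases q1 : p "FEW_CONNECTIONS"
  · rw [List.find?_cons_of_pos (by simpa using q1)] at hf
    obtain rfl : "FEW_CONNECTIONS" = l0 := Option.some.inj hf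
    have hl : pvRankF "FEW_CONNECTIONS" = 6 := by decide
    rw [hl]
    unfold pvRankF
    split_ifs <;> simp_all
  · rw [List.find?_cons_of_neg (by simpa using q1)] at hf
    by_cases q2 : p "FEW_WORKERS"
    · rw [List.find?_cons_of_pos (by simpa using q2)] at hf
      obtain rfl : "FEW_WORKERS" = l0 := Option.some.inj hf
      have hl : pvRankF "FEW_WORKERS" = 5 := by decide
      rw [hl]
      unfold pvRankF
      split_ifs <;> simp_all
    · rw [List.find?_cons_of_neg (by simpa using q2)] at hf
      by_cases q3 : p "CPU_CONTENTION"
      · rw [List.find?_cons_of_pos (by simpa using q3)] at hf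
        obtain rfl : "CPU_CONTENTION" = l0 := Option.some.inj hf
        have hl : pvRankF "CPU_CONTENTION" = 4 := by decide
        rw [hl]
        unfold pvRankF
        split_ifs <;> simp_all
      · rw [List.find?_cons_of_neg (by simpa using q3)] at hf
        by_cases q4 : p "SUT_DEGRADED"
        · rw [List.find?_cons_of_pos (by simpa using q4)] at hf
          obtain rfl : "SUT_DEGRADED" = l0 := Option.some.inj hf
          have hl : pvRankF "SUT_DEGRADED" = 3 := by decide
          rw [hl]
          unfold pvRankF
          split_ifs <;> simp_all
        · rw [List.find?_cons_of_neg (by simpa using q4)] at hf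
          by_cases q5 : p "SUT_FASTER"
          · rw [List.find?_cons_of_pos (by simpa using q5)] at hf
            obtain rfl : "SUT_FASTER" = l0 := Option.some.inj hf
            have hl : pvRankF "SUT_FASTER" = 2 := by decide
            rw [hl]
            unfold pvRankF
            split_ifs <;> simp_all
          · rw [List.find?_cons_of_neg (by simpa using q5)] at hf
            by_cases q6 : p "NORMAL"
            · rw [List.find?_cons_of_pos (by simpa using q6)] at hf
              obtain rfl : "NORMAL" = l0 := Option.some.inj hf
              have hl : pvRankF "NORMAL" = 1 := by decide
              rw [hl]
              unfold pvRankF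
              split_ifs <;> simp_all
            · rw [List.find?_cons_of_neg (by simpa using q6)] at hf
              simp at hf

lemma pvRankF_eq_zero {k : String} (h : k ∉ LABEL_ORDER) : pvRankF k = 0 := by
  simp only [LABEL_ORDER, List.mem_cons, List.not_mem_nil, or_false, not_or] at h
  unfold pvRankF
  split_ifs <;> simp_all

-- ===== VERDICT (by name: the statement is the Claim_ definition above) =====
theorem mode_label_spec : Claim_equal_mode_label := by
  intro labels _
  unfold Spec_mode_label mode_label mode_label_alt
  by_cases hnil : labels = []
  · simp [hnil]
  · simp only [hnil, if_false]
    have hfold : List.foldl (fun (d : PySem.Dict String Int) x => d.insert x (d.getD x 0 + 1))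
        PySem.Dict.empty labels = PySem.Dict.counter labels :=
      PySem.Dict.foldl_insert_getD_add_one_eq_counter labels
    rw [hfold]
    have hitems : (PySem.Dict.counter labels).items
        = (PySem.Set.ofList labels).map (fun k => (k, (labels.count k : Int))) :=
      PySem.Dict.items_counter labels
    have hSne : PySem.Set.ofList labels ≠ [] := by
      obtain ⟨x, t, rfl⟩ := List.exists_cons_of_ne_nil hnil
      intro h
      have hx : x ∈ PySem.Set.ofList (x :: t) := (PySem.Set.mem_ofList _ x).mpr (by simp)
      simp [h] at hx
    have hvals : (PySem.Dict.counter labels).values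
        = (PySem.Set.ofList labels).map (fun k => (labels.count k : Int)) := by
      show (PySem.Dict.counter labels).items.map (·.2) = _
      rw [hitems]; simp [List.map_map, Function.comp]
    obtain ⟨b, hb⟩ : ∃ b, PySem.List.max?
        (PySem.Dict.counter labels).values (fun v => v) = some b := by
      cases h : PySem.List.max? (PySem.Dict.counter labels).values (fun v => v) with
      | none =>
        have := (PySem.List.max?_eq_none_iff _ _).mp h
        rw [hvals] at this; simp [hSne] at this
      | some b => exact ⟨b, rfl⟩
    have hble : ∀ k ∈ PySem.Set.ofList labels, (labels.count k : Int) ≤ b := by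
      intro k hk
      exact PySem.List.max?_isMax hb _ (by rw [hvals]; exact List.mem_map_of_mem hk)
    have hbmem : ∃ k0 ∈ PySem.Set.ofList labels, (labels.count k0 : Int) = b := by
      have := PySem.List.max?_mem hb
      rw [hvals] at this
      simpa using this
    have hb1 : 1 ≤ b := by
      obtain ⟨k0, hk0, he⟩ := hbmem
      have hmem : k0 ∈ labels := (PySem.Set.mem_ofList _ _).mp hk0
      have := List.count_pos_iff.mpr hmem
      omega
    simp only [hb, Option.getD_some]
    cases hA : LABEL_ORDER.find? (fun l => (PySem.Dict.counter labels).getD l 0 == b) with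
    | some l0 =>
      have hcnt : (labels.count l0 : Int) = b := by
        have := List.find?_some hA
        rwa [PySem.Dict.getD_counter, beq_iff_eq] at this
      have hl0S : l0 ∈ PySem.Set.ofList labels := by
        rw [PySem.Set.mem_ofList]
        rw [← List.count_pos_iff]
        omega
      have hmax2 : PySem.List.max2? (PySem.Dict.counter labels).items
          (fun kv => kv.2) (fun kv => pvRankDict.getD kv.1 0) = some (l0, b) := by
        apply pv_max2?_of_strict
        · rw [hitems]
          have : (l0, b) = (fun k => (k, (labels.count k : Int))) l0 := by simp [hcnt]
          rw [this]
          exact List.mem_map_of_mem hl0S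
        · intro y hy hne
          rw [hitems] at hy
          obtain ⟨k, hk, rfl⟩ := List.mem_map.mp hy
          have hkne : k ≠ l0 := by
            rintro rfl
            exact hne (by simp [hcnt])
          have hle' := hble k hk
          by_cases hlt : (labels.count k : Int) < b
          · exact Or.inl hlt
          · refine Or.inr ⟨by simp; omega, ?_⟩
            simp only [pvRankDict_getD]
            refine pv_find_rank_lt _ _ hA k ?_ hkne
            rw [PySem.Dict.getD_counter, beq_iff_eq]
            omega
      simp only [hmax2]
    | none =>
      have hnone : ∀ l ∈ LABEL_ORDER, (labels.count l : Int) ≠ b := by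
        intro l hl
        have := List.find?_eq_none.mp hA l hl
        simpa [PySem.Dict.getD_counter] using this
      obtain ⟨x0, hx0⟩ : ∃ x0, ((PySem.Dict.counter labels).items).find?
          (fun x => x.2 == b) = some x0 := by
        obtain ⟨k0, hk0, he⟩ := hbmem
        have hex : ∃ x ∈ (PySem.Dict.counter labels).items, (x.2 == b) = true := by
          refine ⟨(k0, (labels.count k0 : Int)), ?_, by simp [he]⟩
          rw [hitems]
          exact List.mem_map_of_mem hk0
        have := List.find?_isSome.mpr hex
        cases h : ((PySem.Dict.counter labels).items).find? (fun x => x.2 == b) with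
        | none => rw [h] at this; simp at this
        | some x0 => exact ⟨x0, rfl⟩
      have hleI : ∀ y ∈ (PySem.Dict.counter labels).items, y.2 ≤ b := by
        intro y hy
        rw [hitems] at hy
        obtain ⟨k, hk, rfl⟩ := List.mem_map.mp hy
        exact hble k hk
      have hc0 : ∀ y ∈ (PySem.Dict.counter labels).items, y.2 = b →
          pvRankDict.getD y.1 0 = 0 := by
        intro y hy he
        rw [hitems] at hy
        obtain ⟨k, hk, rfl⟩ := List.mem_map.mp hy
        rw [pvRankDict_getD]
        exact pvRankF_eq_zero (fun hkL => hnone k hkL he)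
      have hmaxA : PySem.List.max? (PySem.Dict.counter labels).items
          (fun p => p.2) = some x0 := by
        rw [pv_max?_eq_max2?]
        exact pv_max2?_eq_find _ _ b 0 _ x0 hleI (fun y _ _ => rfl) hx0
      have hmaxB : PySem.List.max2? (PySem.Dict.counter labels).items
          (fun kv => kv.2) (fun kv => pvRankDict.getD kv.1 0) = some x0 :=
        pv_max2?_eq_find _ _ b 0 _ x0 hleI hc0 hx0
      simp only [hmaxA, hmaxB]
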